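-- pv_equiv track=rewrite | github.com/FrancoCastro89/parcial_tecnicas_programacion | punto2.py | juego
-- ===== SOURCE A (Python) =====
-- def vidaDelasposicionesDeLosBarcos(vida, posicion):
--
--     siguiente = []
--     for f in range(len(vida)):
--         fila = []
--         for c in range(len(vida[0])):
--             fila.append(continuandoConCeldaSiguiente(vida, f, c, posicion))
--         siguiente.append(fila)
--     return siguiente
--
-- def continuandoConCeldaSiguiente(vida, f, c, posicion):
--
--     for x in range(len(posicion)):
--
--         fi = (posicion[x][0]) - 1
--         co = (posicion[x][1]) - 1
--         if f == fi and c == co: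
--             punto = '.'
--             return punto
--     return vida[f][c]
--
-- def juego(mapa,posicionesDeDisparosDePrueba):
--
--     caja = []
--     for x in range(1, len(mapa)):
--         if len(mapa[x - 1]) != len(mapa[x]):
--             return caja
--     pet = []
--     for recorreFila in range(len(vidaDelasposicionesDeLosBarcos(mapa, posicionesDeDisparosDePrueba))):
--         li = ()
--         for recorreColumna in range(len(vidaDelasposicionesDeLosBarcos(mapa, posicionesDeDisparosDePrueba)[0])):
--             if vidaDelasposicionesDeLosBarcos(mapa, posicionesDeDisparosDePrueba)[recorreFila][recorreColumna] == 'b':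
--                 li = (recorreFila + 1, recorreColumna + 1)
--             if li != [] and len(li) == 2:
--                 pet.append(li)
--                 li = []
--     return pet
-- ===== SOURCE B (Python) =====
-- def juego(mapa, posicionesDeDisparosDePrueba):
--     # Same early-[] on any adjacent row-length mismatch, then one direct scan:
--     # no intermediate '.'-marked grid is ever built.
--     if any(len(a) != len(b) for a, b in zip(mapa, mapa[1:])):
--         return []
--     disparos = {(s[0], s[1]) for s in posicionesDeDisparosDePrueba}
--     res = []
--     for f, fila in enumerate(mapa):
--         for c, celda in enumerate(fila):
--             if celda == 'b' and (f + 1, c + 1) not in disparos: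
--                 res.append((f + 1, c + 1))
--     return res
-- ===== Notes on version B (the rewrite author's own statement) =====
-- stated objective: faster
-- what changed: B drops the grid-rebuilding helper entirely: instead of re-materialising the '.'-marked grid (A rebuilds it from scratch inside every loop bound and every cell test), B builds one set of shot coordinates and does a single double scan over mapa, emitting (f+1,c+1) for each 'b' cell not in the set.
-- outside the precondition, e.g. on juego([], [[1]]): A returns [], B raises IndexError; on juego([['b']], [[1, 1], [5]]): A returns [], B raises IndexError
import Mathlib
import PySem

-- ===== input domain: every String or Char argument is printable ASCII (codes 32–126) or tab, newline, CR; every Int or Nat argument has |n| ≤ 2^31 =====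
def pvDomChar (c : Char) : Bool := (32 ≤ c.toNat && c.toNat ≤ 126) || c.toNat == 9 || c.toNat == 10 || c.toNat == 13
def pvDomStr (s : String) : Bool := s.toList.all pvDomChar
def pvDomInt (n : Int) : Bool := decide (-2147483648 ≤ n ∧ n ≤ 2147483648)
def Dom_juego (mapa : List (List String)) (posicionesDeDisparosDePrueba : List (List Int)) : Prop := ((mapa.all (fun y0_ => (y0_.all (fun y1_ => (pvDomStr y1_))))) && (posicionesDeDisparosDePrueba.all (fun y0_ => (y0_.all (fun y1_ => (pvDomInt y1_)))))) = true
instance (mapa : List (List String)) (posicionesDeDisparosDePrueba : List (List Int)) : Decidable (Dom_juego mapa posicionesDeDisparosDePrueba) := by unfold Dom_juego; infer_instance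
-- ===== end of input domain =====

-- B replaces A's repeatedly rebuilt '.'-marked grid with one shot-coordinate set and a single
-- direct scan over mapa (objective: faster).


-- ===== PORT A =====
-- posicion[x][0]/[1] are ported with pyGetD (default 0): on inputs admitted by Pre_juego every
-- shot actually read has length ≥ 2, so the default is never taken where Python returns.
def continuandoConCeldaSiguiente (vida : List (List String)) (f c : Nat)
    (posicion : List (List Int)) : String :=
  match posicion with
  | [] => (((vida[f]?.getD []))[c]?.getD "")   -- vida[f][c]; f, c in range at every call site
  | p :: rest =>
      let fi := PySem.List.pyGetD p 0 0 - 1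
      let co := PySem.List.pyGetD p 1 0 - 1
      if (f : Int) = fi ∧ (c : Int) = co then "."
      else continuandoConCeldaSiguiente vida f c rest

-- 'fila.append' / 'siguiente.append' loops as foldl with ++ [·]; len(vida[0]) as head?.getD []
-- (Python evaluates vida[0] only when the outer loop runs, i.e. vida ≠ []).
def vidaDelasposicionesDeLosBarcos (vida : List (List String))
    (posicion : List (List Int)) : List (List String) :=
  (List.range vida.length).foldl
    (fun siguiente f =>
      siguiente ++ [(List.range ((vida.head?.getD []).length)).foldl
        (fun fila c => fila ++ [continuandoConCeldaSiguiente vida f c posicion]) []])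
    []

-- li is () or [] (never appended, identical behaviour under "li != [] and len(li) == 2") or a
-- 2-tuple: modelled as Option (Int × Int), none for ()/[].
def juego (mapa : List (List String)) (posicionesDeDisparosDePrueba : List (List Int)) : List (Int × Int) :=
  if (List.range' 1 (mapa.length - 1)).any
      (fun x => (mapa[x - 1]?.getD []).length ≠ (mapa[x]?.getD []).length)
  then []   -- 'return caja'
  else
    (List.range (vidaDelasposicionesDeLosBarcos mapa posicionesDeDisparosDePrueba).length).foldl
      (fun (pet : List (Int × Int)) (recorreFila : Nat) =>
        ((List.range (((vidaDelasposicionesDeLosBarcos mapa posicionesDeDisparosDePrueba).head?.getD []).length)).foldl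
          (fun (st : List (Int × Int) × Option (Int × Int)) (recorreColumna : Nat) =>
            let li :=
              if (((vidaDelasposicionesDeLosBarcos mapa posicionesDeDisparosDePrueba)[recorreFila]?.getD [])[recorreColumna]?.getD "") = "b"
              then some ((recorreFila : Int) + 1, (recorreColumna : Int) + 1)
              else st.2
            li.elim (st.1, none) (fun v => (st.1 ++ [v], none)))
          (pet, none)).1)
      []

-- ===== PORT B =====
def juego_alt (mapa : List (List String)) (posicionesDeDisparosDePrueba : List (List Int)) : List (Int × Int) :=
  if (mapa.zip (mapa.drop 1)).any (fun ab => ab.1.length ≠ ab.2.length) then []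
  else
    let disparos : PySem.Set (Int × Int) :=
      PySem.Set.ofList (posicionesDeDisparosDePrueba.map
        (fun s => (PySem.List.pyGetD s 0 0, PySem.List.pyGetD s 1 0)))
    (PySem.List.enumerate mapa 0).foldl
      (fun res p =>
        (PySem.List.enumerate p.2 0).foldl
          (fun res q =>
            if q.2 = "b" ∧ ¬ PySem.Set.contains disparos (p.1 + 1, q.1 + 1) = true
            then res ++ [(p.1 + 1, q.1 + 1)] else res)
          res)
      []

-- ===== PRECONDITION & SPEC =====
-- Pre_ excludes inputs where some shot list has fewer than 2 entries while no adjacent row-length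
-- mismatch triggers the early return: there Python A raises IndexError on the first unshielded
-- cell's scan (and Python B raises while building the shot set); on the few such inputs without a
-- reachable cell A still returns [] — cited in claim.json.
def Pre_juego (mapa : List (List String)) (posicionesDeDisparosDePrueba : List (List Int)) : Prop :=
  (∃ ab ∈ mapa.zip (mapa.drop 1), ab.1.length ≠ ab.2.length) ∨
    (∀ s ∈ posicionesDeDisparosDePrueba, 2 ≤ s.length)
instance (mapa : List (List String)) (posicionesDeDisparosDePrueba : List (List Int)) : Decidable (Pre_juego mapa posicionesDeDisparosDePrueba) := by unfold Pre_juego; infer_instance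

def pvWitness_juego : List (List String) × List (List Int) :=
  ([["b", "."], ["b", "b"]], [[1, 1], [2, 5]])

def Spec_juego (mapa : List (List String)) (posicionesDeDisparosDePrueba : List (List Int)) (out : List (Int × Int)) : Prop := out = juego_alt mapa posicionesDeDisparosDePrueba
instance (mapa : List (List String)) (posicionesDeDisparosDePrueba : List (List Int)) (out : List (Int × Int)) : Decidable (Spec_juego mapa posicionesDeDisparosDePrueba out) := by unfold Spec_juego; infer_instance

-- ===== CLAIM (what is proved, stated in full; the proofs are below) =====
-- The totalized ports agree on all of Dom (the pyGetD defaults line up on both sides); Pre_ marks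
-- where the PYTHON programs return rather than raise, which is what the claim is about.
def Claim_equal_juego : Prop := ∀ (mapa : List (List String)) (posicionesDeDisparosDePrueba : List (List Int)), Dom_juego mapa posicionesDeDisparosDePrueba → Pre_juego mapa posicionesDeDisparosDePrueba → Spec_juego mapa posicionesDeDisparosDePrueba (juego mapa posicionesDeDisparosDePrueba)

-- ===== LEMMAS AND PROOFS =====

-- A's index-based adjacent-row-length check equals B's zip-based one.
theorem rowcheck_eq (mapa : List (List String)) :
    (List.range' 1 (mapa.length - 1)).any
      (fun x => (mapa[x - 1]?.getD []).length ≠ (mapa[x]?.getD []).length)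
    = (mapa.zip (mapa.drop 1)).any (fun ab => ab.1.length ≠ ab.2.length) := by
  rw [Bool.eq_iff_iff, List.any_eq_true, List.any_eq_true]
  constructor
  · rintro ⟨x, hx, hp⟩
    rw [List.mem_range'_1] at hx
    obtain ⟨hx1, hx2⟩ := hx
    have hzl : (mapa.zip (mapa.drop 1)).length = mapa.length - 1 := by
      simp [List.length_zip]
    have hxm : x - 1 < (mapa.zip (mapa.drop 1)).length := by omega
    refine ⟨(mapa.zip (mapa.drop 1))[x - 1], List.getElem_mem _, ?_⟩
    have h1 : (mapa.zip (mapa.drop 1))[x - 1] = (mapa[x - 1]'(by omega), mapa[x]'(by omega)) := by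
      have hx' : mapa[x - 1 + 1]'(by omega) = mapa[x]'(by omega) := by
        congr 1
        omega
      simp [List.getElem_zip, hx']
    rw [h1]
    simpa [List.getElem?_eq_getElem, (by omega : x - 1 < mapa.length), (by omega : x < mapa.length)]
      using hp
  · rintro ⟨ab, hab, hp⟩
    rw [List.mem_iff_getElem] at hab
    obtain ⟨i, hi, hab⟩ := hab
    have hzl : (mapa.zip (mapa.drop 1)).length = mapa.length - 1 := by
      simp [List.length_zip]
    refine ⟨i + 1, ?_, ?_⟩
    · rw [List.mem_range'_1]; omega
    · have h1 : (mapa.zip (mapa.drop 1))[i]'hi = (mapa[i]'(by omega), mapa[i + 1]'(by omega)) := by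
        simp [List.getElem_zip]
      rw [h1] at hab
      simpa [List.getElem?_eq_getElem, (by omega : i < mapa.length), (by omega : i + 1 < mapa.length),
        ← hab] using hp

-- With no adjacent mismatch every row has the head row's length.
theorem rows_const (mapa : List (List String))
    (h : (mapa.zip (mapa.drop 1)).any (fun ab => ab.1.length ≠ ab.2.length) = false) :
    ∀ i (hi : i < mapa.length), (mapa[i]'hi).length = (mapa.head?.getD []).length := by
  have hadj : ∀ i (hi1 : i + 1 < mapa.length),
      (mapa[i]'(by omega)).length = (mapa[i + 1]'hi1).length := by
    intro i hi1
    have hmem : (mapa[i]'(by omega), mapa[i + 1]'hi1) ∈ mapa.zip (mapa.drop 1) := by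
      rw [List.mem_iff_getElem]
      refine ⟨i, by simp [List.length_zip]; omega, by simp [List.getElem_zip]⟩
    have := List.any_eq_false.mp h _ hmem
    simpa using this
  intro i
  induction i with
  | zero =>
      intro hi
      rw [List.head?_eq_getElem?, List.getElem?_eq_getElem hi]
      rfl
  | succ k ih =>
      intro hi
      rw [← hadj k hi]
      exact ih (by omega)

-- The append-built grid is a map over index ranges.
theorem grid_eq (vida : List (List String)) (pos : List (List Int)) :
    vidaDelasposicionesDeLosBarcos vida pos
      = (List.range vida.length).map (fun f =>
          (List.range ((vida.head?.getD []).length)).map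
            (fun c => continuandoConCeldaSiguiente vida f c pos)) := by
  unfold vidaDelasposicionesDeLosBarcos
  rw [PySem.List.foldl_append_singleton_eq_map]
  rw [List.nil_append]
  refine List.map_congr_left ?_
  intro f _
  rw [PySem.List.foldl_append_singleton_eq_map, List.nil_append]

-- The shot scan returns '.' exactly when some shot names this cell, else the original cell.
theorem cont_eq (vida : List (List String)) (f c : Nat) (pos : List (List Int)) :
    continuandoConCeldaSiguiente vida f c pos
      = if ∃ s ∈ pos, (f : Int) = PySem.List.pyGetD s 0 0 - 1 ∧ (c : Int) = PySem.List.pyGetD s 1 0 - 1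
        then "." else ((vida[f]?.getD [])[c]?.getD "") := by
  induction pos with
  | nil => simp [continuandoConCeldaSiguiente]
  | cons p rest ih =>
      simp only [continuandoConCeldaSiguiente]
      by_cases h : (f : Int) = PySem.List.pyGetD p 0 0 - 1 ∧ (c : Int) = PySem.List.pyGetD p 1 0 - 1
      · simp [h]
      · simp only [if_neg h, ih]
        by_cases h2 : ∃ s ∈ rest, (f : Int) = PySem.List.pyGetD s 0 0 - 1 ∧ (c : Int) = PySem.List.pyGetD s 1 0 - 1
        · simp [h2, h]
        · simp [h2, h]

-- A's per-row loop with its tuple/list flag li: the flag is none after every step, the appended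
-- pairs are exactly the 'b' cells.
theorem innerA (vida : List (List String)) (pos : List (List Int)) (f : Nat) (l : List Nat)
    (pet : List (Int × Int)) :
    l.foldl
      (fun (st : List (Int × Int) × Option (Int × Int)) (c : Nat) =>
        let li := if (((vidaDelasposicionesDeLosBarcos vida pos)[f]?.getD [])[c]?.getD "") = "b"
                  then some ((f : Int) + 1, (c : Int) + 1) else st.2
        li.elim (st.1, none) (fun v => (st.1 ++ [v], none)))
      (pet, none)
    = (pet ++ (l.filter
          (fun c => (((vidaDelasposicionesDeLosBarcos vida pos)[f]?.getD [])[c]?.getD "") = "b")).map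
          (fun c => ((f : Int) + 1, (c : Int) + 1)), none) := by
  induction l generalizing pet with
  | nil => simp
  | cons c l ih =>
      by_cases h : (((vidaDelasposicionesDeLosBarcos vida pos)[f]?.getD [])[c]?.getD "") = "b" <;>
        simp [List.foldl_cons, h, ih]

-- ===== VERDICT (by name: the statement is the Claim_ definition above) =====
theorem juego_spec : Claim_equal_juego := by
  intro mapa pos _hdom _hpre
  show juego mapa pos = juego_alt mapa pos
  unfold juego juego_alt
  rw [rowcheck_eq]
  by_cases hmz : (mapa.zip (mapa.drop 1)).any (fun ab => ab.1.length ≠ ab.2.length) = true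
  · rw [if_pos hmz, if_pos hmz]
  · rw [if_neg hmz, if_neg hmz]
    simp only [innerA]
    rw [PySem.List.foldl_append_eq_flatMap]
    simp only [PySem.List.foldl_append_ite]
    rw [PySem.List.foldl_append_eq_flatMap]
    simp only [List.nil_append, grid_eq, List.length_map, List.length_range]
    obtain _ | ⟨r0, rest⟩ := mapa
    · simp [PySem.List.enumerate]
    · simp only [List.length_cons, List.head?_cons, Option.getD_some]
      have hhead : (List.map (fun f => List.map
            (fun c => continuandoConCeldaSiguiente (r0 :: rest) f c pos) (List.range r0.length))
            (List.range (rest.length + 1))).head?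
          = some (List.map (fun c => continuandoConCeldaSiguiente (r0 :: rest) 0 c pos)
              (List.range r0.length)) := by
        rw [List.head?_eq_getElem?]
        simp
      rw [hhead]
      simp only [Option.getD_some, List.length_map, List.length_range]
      rw [PySem.List.enumerate_eq_map_pyRange (r0 :: rest) ([] : List String), List.flatMap_map]
      have hlen : PySem.List.len (r0 :: rest) = ((rest.length + 1 : Nat) : Int) := by
        simp [PySem.List.len]
      rw [hlen, PySem.List.pyRange_zero_natCast, List.flatMap_map]
      refine List.flatMap_congr ?_
      intro f hf
      rw [List.mem_range] at hf
      have hzf : ((r0 :: rest).zip (List.drop 1 (r0 :: rest))).any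
          (fun ab => ab.1.length ≠ ab.2.length) = false := by
        revert hmz
        cases ((r0 :: rest).zip (List.drop 1 (r0 :: rest))).any
          (fun ab => ab.1.length ≠ ab.2.length) <;> simp
      have hrowlen : ((r0 :: rest)[f]'hf).length = r0.length := by
        simpa using rows_const (r0 :: rest) hzf f hf
      have hgrid : ((List.map (fun f => List.map
            (fun c => continuandoConCeldaSiguiente (r0 :: rest) f c pos) (List.range r0.length))
            (List.range (rest.length + 1)))[f]?.getD [])
          = List.map (fun c => continuandoConCeldaSiguiente (r0 :: rest) f c pos)
              (List.range r0.length) := by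
        simp [hf]
      have hrowD : PySem.List.pyGetD (r0 :: rest) (f : Int) [] = (r0 :: rest)[f]'hf := by
        simp [List.getD_eq_getElem?_getD,
          List.getElem?_eq_getElem (show f < (r0 :: rest).length from by simpa using hf)]
        rfl
      simp only [hgrid, hrowD]
      rw [PySem.List.enumerate_eq_map_pyRange ((r0 :: rest)[f]'hf) ("" : String)]
      have hlen2 : PySem.List.len ((r0 :: rest)[f]'hf) = ((r0.length : Nat) : Int) := by
        simp [PySem.List.len, hrowlen]
      rw [hlen2, PySem.List.pyRange_zero_natCast]
      simp only [List.filter_map, List.map_map]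
      simp [Function.comp_def]
      have hcast : ∀ (l : List Nat),
          l.flatMap (fun a => [(Nat.cast a : Int)]) = l.map (fun a => (Nat.cast a : Int)) := by
        intro l
        induction l with
        | nil => rfl
        | cons x xs ih => simp [ih]
      rw [hcast, List.map_map]
      simp only [Function.comp_def]
      refine congrArg _ (List.filter_congr ?_)
      intro c hc
      rw [List.mem_range] at hc
      have hc' : c < ((r0 :: rest)[f]'hf).length := by omega
      have hfq : (r0 :: rest)[f]?.getD [] = (r0 :: rest)[f]'hf := by
        simp [List.getElem?_eq_getElem (show f < (r0 :: rest).length from by simpa using hf)]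
        rfl
      simp only [List.getElem?_range, hc, List.getElem?_eq_getElem hc',
        Option.map_some, Option.getD_some]
      rw [cont_eq]
      rw [Bool.eq_iff_iff]
      simp only [decide_eq_true_eq, Bool.and_eq_true]
      constructor
      · intro h
        by_cases hM : ∃ s ∈ pos, (f : Int) = PySem.List.pyGetD s 0 0 - 1 ∧
            (c : Int) = PySem.List.pyGetD s 1 0 - 1
        · rw [if_pos hM] at h
          exact absurd h (by decide)
        · rw [if_neg hM] at h
          push Not at hM
          refine ⟨?_, ?_⟩
          · rw [hfq, List.getElem?_eq_getElem hc'] at h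
            simpa using h
          · intro s hs h0
            have := hM s hs
            intro h1
            exact this (by omega) (by omega)
      · rintro ⟨hb, hall⟩
        have hM : ¬ ∃ s ∈ pos, (f : Int) = PySem.List.pyGetD s 0 0 - 1 ∧
            (c : Int) = PySem.List.pyGetD s 1 0 - 1 := by
          rintro ⟨s, hs, h0, h1⟩
          exact hall s hs (by omega) (by omega)
        rw [if_neg hM]
        rw [hfq, List.getElem?_eq_getElem hc']
        simpa using hb
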